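-- pv_equiv track=rewrite | github.com/an-jiohh/algorithm-solutions | programmers/자동 완성.py | solution
-- ===== SOURCE A (Python) =====
-- def solution(words):
--     root = {"ch":{}, "count":0, "end":False}
--
--     for word in words:
--         node = root
--         node["count"] += 1
--         for w in word :
--             node["ch"][w] = node["ch"].get(w, {"ch":{}, "count":0, "end":False})
--             node = node["ch"][w]
--             node["count"] += 1
--         node["end"] = True
--     answer = 0
--     for word in words:
--         node = root
--         typed = 0
--         for w in word:
--             node = node["ch"][w]
--             typed += 1
--             if node["count"] == 1 :
--                 break
--         answer += typed
--
--     return answer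
-- ===== SOURCE B (Python) =====
-- def _lcp(a, b):
--     k = 0
--     for x, y in zip(a, b):
--         if x != y:
--             break
--         k += 1
--     return k
--
--
-- def solution(words):
--     total = 0
--     for i, w in enumerate(words):
--         others = words[:i] + words[i + 1:]
--         best = 0
--         for v in others:
--             best = max(best, _lcp(w, v))
--         total += min(len(w), best + 1)
--     return total
-- ===== Notes on version B (the rewrite author's own statement) =====
-- stated objective: alternative
-- what changed: B drops A's trie entirely: for each word it takes the maximum longest-common-prefix length with the other words and adds min(len(word), L+1), instead of building a counted prefix tree and walking it until a count-1 node.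
import Mathlib
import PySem

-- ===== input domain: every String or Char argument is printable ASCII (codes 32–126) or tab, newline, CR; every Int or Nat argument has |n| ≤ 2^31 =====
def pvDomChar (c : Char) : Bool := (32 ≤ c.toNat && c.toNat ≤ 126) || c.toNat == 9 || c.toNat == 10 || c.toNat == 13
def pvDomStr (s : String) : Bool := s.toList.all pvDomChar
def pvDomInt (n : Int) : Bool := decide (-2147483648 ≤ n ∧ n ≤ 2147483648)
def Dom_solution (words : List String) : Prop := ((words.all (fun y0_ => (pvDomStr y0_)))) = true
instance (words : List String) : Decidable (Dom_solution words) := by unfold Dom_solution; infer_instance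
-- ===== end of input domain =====

-- B replaces A's trie with a per-word maximum-LCP scan over the other words: alternative algorithm, same exact results.

-- ===== PORT A =====
-- A's nested dicts {"ch":…, "count":…, "end":…} are encoded as a mutual inductive:
-- `Ch` is the children dict (insertion-ordered association list, exact for dict get/set).
mutual
inductive Trie where
  | node : Int → Bool → Ch → Trie
inductive Ch where
  | nil : Ch
  | cons : Char → Trie → Ch → Ch
end

-- dict lookup node["ch"].get / node["ch"][w]
def chGet? : Ch → Char → Option Trie
  | .nil, _ => none
  | .cons c t r, x => if x = c then some t else chGet? r x

-- dict assignment node["ch"][w] = … (overwrite in place, else append)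
def chSet : Ch → Char → Trie → Ch
  | .nil, x, t => .cons x t .nil
  | .cons c u r, x, t => if x = c then .cons c t r else .cons c u (chSet r x t)

def trieCount : Trie → Int
  | .node c _ _ => c

-- the insertion loop: count += 1 at every node on the path, end = True at the last
def insertAux : List Char → Trie → Trie
  | [], .node c _ ch => .node (c + 1) true ch
  | x :: rest, .node c e ch =>
      let child := (chGet? ch x).getD (.node 0 false .nil)
      .node (c + 1) e (chSet ch x (insertAux rest child))

-- the query loop: typed += 1, break when node["count"] == 1
def queryAux : List Char → Trie → Int → Int
  | [], _, typed => typed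
  | x :: rest, .node _ _ ch, typed =>
    match chGet? ch x with
    | none => typed   -- unreachable: Python would raise KeyError, but every queried word was inserted
    | some child =>
      if trieCount child = 1 then typed + 1
      else queryAux rest child (typed + 1)

def solution (words : List String) : Int :=
  let root := words.foldl (fun t w => insertAux w.toList t) (.node 0 false .nil)
  words.foldl (fun a w => a + queryAux w.toList root 0) 0

-- ===== PORT B =====
-- _lcp: the zip loop counting equal leading characters
def lcpChars : List Char → List Char → Int
  | x :: xs, y :: ys => if x = y then 1 + lcpChars xs ys else 0
  | _, _ => 0

def solution_alt (words : List String) : Int :=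
  (PySem.List.enumerate words).foldl
    (fun total wi =>
      let others := PySem.List.slice words none (some wi.1) ++ PySem.List.slice words (some (wi.1 + 1)) none
      let best := others.foldl (fun b v => max b (lcpChars wi.2.toList v.toList)) 0
      total + min ((wi.2.length : Int)) (best + 1)) 0

-- ===== PRECONDITION & SPEC =====
def Spec_solution (words : List String) (out : Int) : Prop := out = solution_alt words
instance (words : List String) (out : Int) : Decidable (Spec_solution words out) := by unfold Spec_solution; infer_instance

-- ===== CLAIM (what is proved, stated in full; the proofs are below) =====
def Claim_equal_solution : Prop := ∀ (words : List String), Dom_solution words → Spec_solution words (solution words)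

-- ===== LEMMAS AND PROOFS =====

-- count stored at the node reached from t by the path p (0 if the path is absent)
def countAt : Trie → List Char → Int
  | .node c _ _, [] => c
  | .node _ _ ch, x :: q =>
    match chGet? ch x with
    | none => 0
    | some t => countAt t q

-- tail of v if v starts with x
def tailIf (x : Char) : List Char → Option (List Char)
  | [] => none
  | y :: v => if y = x then some v else none

theorem chGet?_chSet : ∀ (ch : Ch) (x : Char) (t : Trie) (y : Char),
    chGet? (chSet ch x t) y = if y = x then some t else chGet? ch y
  | .nil, x, t, y => by
      by_cases h : y = x <;> simp [chSet, chGet?, h]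
  | .cons c u r, x, t, y => by
      by_cases hxc : x = c
      · subst hxc
        by_cases hyx : y = x <;> simp [chSet, chGet?, hyx]
      · have hr := chGet?_chSet r x t y
        simp only [chSet, if_neg hxc, chGet?]
        by_cases hyc : y = c
        · have hyx : ¬ y = x := by rw [hyc]; intro h; exact hxc h.symm
          have hcx : ¬ c = x := fun h => hxc h.symm
          simp [chGet?, hyc, hyx, hcx]
        · simp [chGet?, hyc, hr]

theorem countAt_fresh (p : List Char) : countAt (.node 0 false .nil) p = 0 := by
  cases p <;> simp [countAt, chGet?]

theorem countAt_insert (p : List Char) : ∀ (w : List Char) (t : Trie),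
    countAt (insertAux w t) p = countAt t p + (if p.isPrefixOf w then 1 else 0) := by
  induction p with
  | nil =>
      intro w t
      cases t with
      | node c e ch => cases w <;> simp [insertAux, countAt, List.isPrefixOf]
  | cons x q ih =>
      intro w t
      cases t with
      | node c e ch =>
        cases w with
        | nil => simp [insertAux, countAt, List.isPrefixOf]
        | cons y w' =>
          by_cases hxy : x = y
          · subst hxy
            cases hg : chGet? ch x with
            | none =>
                simp [insertAux, countAt, chGet?_chSet, hg, ih, countAt_fresh,
                  List.isPrefixOf]
            | some u =>
                simp [insertAux, countAt, chGet?_chSet, hg, ih, List.isPrefixOf]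
          · have hp : (x :: q).isPrefixOf (y :: w') = false := by
              simp [List.isPrefixOf]; intro h; exact absurd h hxy
            simp [insertAux, countAt, chGet?_chSet, hxy, hp]

theorem countAt_build (ws : List String) : ∀ (t : Trie) (q : List Char),
    countAt (ws.foldl (fun t w => insertAux w.toList t) t) q
      = countAt t q + (ws.countP (fun w => q.isPrefixOf w.toList) : Int) := by
  induction ws with
  | nil => intro t q; simp
  | cons w ws ih =>
      intro t q
      simp only [List.foldl_cons, ih, countAt_insert, List.countP_cons]
      by_cases h : q.isPrefixOf w.toList = true <;> simp [h] <;> push_cast <;> ring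

theorem lcp_nonneg (a b : List Char) : 0 ≤ lcpChars a b := by
  induction a generalizing b with
  | nil => simp [lcpChars]
  | cons x xs ih =>
      cases b with
      | nil => simp [lcpChars]
      | cons y ys => by_cases h : x = y <;> simp [lcpChars, h] <;> have := ih ys <;> omega

theorem countP_shift (x : Char) (q : List Char) (os : List (List Char)) :
    os.countP (fun v => (x :: q).isPrefixOf v)
      = (os.filterMap (tailIf x)).countP (fun v => q.isPrefixOf v) := by
  induction os with
  | nil => simp
  | cons v os ih =>
      cases v with
      | nil => simp [List.countP_cons, tailIf, List.isPrefixOf, ih]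
      | cons y vt =>
        by_cases h : y = x
        · subst h
          simp [List.countP_cons, tailIf, List.isPrefixOf, ih]
        · have : (x :: q).isPrefixOf (y :: vt) = false := by
            simp [List.isPrefixOf]; intro hxy; exact absurd hxy.symm h
          simp [List.countP_cons, tailIf, h, this, ih]

theorem fmax_acc (f : List Char → Int) (l : List (List Char)) : ∀ (a b : Int),
    l.foldl (fun b v => max b (f v)) (max a b) = max a (l.foldl (fun b v => max b (f v)) b) := by
  induction l with
  | nil => intro a b; rfl
  | cons v l ih =>
      intro a b
      simp only [List.foldl_cons, max_assoc]
      exact ih a (max b (f v))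

theorem fmax_zero (f : List Char → Int) (l : List (List Char)) (h : ∀ v ∈ l, f v = 0) :
    l.foldl (fun b v => max b (f v)) 0 = 0 := by
  induction l with
  | nil => rfl
  | cons v l ih =>
      simp only [List.foldl_cons, h v (by simp), max_self]
      exact ih (fun v hv => h v (by simp [hv]))

theorem fmax_nonneg (f : List Char → Int) (l : List (List Char)) :
    0 ≤ l.foldl (fun b v => max b (f v)) 0 :=
  (PySem.List.le_foldl_max_int l f 0).1

theorem fmax_step (x : Char) (rest : List Char) (os : List (List Char))
    (h : 0 < os.countP (fun v => [x].isPrefixOf v)) :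
    os.foldl (fun b v => max b (lcpChars (x :: rest) v)) 0
      = 1 + (os.filterMap (tailIf x)).foldl (fun b v => max b (lcpChars rest v)) 0 := by
  induction os with
  | nil => simp at h
  | cons v os ih =>
      cases v with
      | nil =>
          have h' : 0 < os.countP (fun v => [x].isPrefixOf v) := by
            simpa [List.countP_cons, List.isPrefixOf] using h
          have hf : List.filterMap (tailIf x) ([] :: os) = List.filterMap (tailIf x) os := by
            simp [tailIf]
          rw [List.foldl_cons, hf, show lcpChars (x :: rest) [] = 0 from rfl]
          simpa using ih h'
      | cons y vt =>
        by_cases hyx : y = x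
        · subst hyx
          have hvt : lcpChars (y :: rest) (y :: vt) = 1 + lcpChars rest vt := by
            simp only [lcpChars]; simp
          have hfm : List.filterMap (tailIf y) ((y :: vt) :: os)
              = vt :: List.filterMap (tailIf y) os := by simp [tailIf]
          rw [List.foldl_cons, hfm, List.foldl_cons, hvt]
          rw [show max (0:Int) (1 + lcpChars rest vt) = max (1 + lcpChars rest vt) 0 from
            max_comm _ _, fmax_acc]
          rw [show max (0:Int) (lcpChars rest vt) = max (lcpChars rest vt) 0 from
            max_comm _ _, fmax_acc]
          by_cases hos : 0 < os.countP (fun v => [y].isPrefixOf v)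
          · rw [ih hos]
            have h1 := fmax_nonneg (lcpChars rest) (os.filterMap (tailIf y))
            have h2 := lcp_nonneg rest vt
            omega
          · have hz : ∀ v ∈ os, lcpChars (y :: rest) v = 0 := by
              intro v hv
              have hnp : ¬ ([y].isPrefixOf v = true) := by
                intro hp
                exact hos (List.countP_pos_iff.mpr ⟨v, hv, hp⟩)
              cases v with
              | nil => rfl
              | cons z zt =>
                  have hyz : ¬ (y = z) := by
                    intro hh; exact hnp (by simp [List.isPrefixOf, hh])
                  simp only [lcpChars]
                  rw [if_neg hyz]
            have hnil : os.filterMap (tailIf y) = [] := by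
              rw [List.filterMap_eq_nil_iff]
              intro v hv
              have hnp : ¬ ([y].isPrefixOf v = true) := by
                intro hp
                exact hos (List.countP_pos_iff.mpr ⟨v, hv, hp⟩)
              cases v with
              | nil => rfl
              | cons z zt =>
                  have hyz : ¬ (y = z) := by
                    intro hh; exact hnp (by simp [List.isPrefixOf, hh])
                  have hzy : ¬ (z = y) := fun hh => hyz hh.symm
                  simp [tailIf, hzy]
            rw [fmax_zero _ _ hz, hnil]
            simp only [List.foldl_nil]
            have := lcp_nonneg rest vt
            omega
        · have hp : ([x].isPrefixOf (y :: vt)) = false := by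
            simp [List.isPrefixOf]; intro hxy; exact absurd hxy.symm hyx
          have h' : 0 < os.countP (fun v => [x].isPrefixOf v) := by
            simpa [List.countP_cons, hp] using h
          have hl : lcpChars (x :: rest) (y :: vt) = 0 := by
            simp only [lcpChars]
            rw [if_neg (fun h => hyx h.symm)]
          have hfm : List.filterMap (tailIf x) ((y :: vt) :: os)
              = List.filterMap (tailIf x) os := by simp [tailIf, hyx]
          rw [List.foldl_cons, hfm, hl]
          simpa using ih h'

theorem countAt_nil (t : Trie) : countAt t [] = trieCount t := by
  cases t; rfl

theorem qmain : ∀ (w : List Char) (os : List (List Char)) (t : Trie) (typed : Int),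
    (∀ q, countAt t q = (os.countP (fun v => q.isPrefixOf v) : Int)
        + (if q.isPrefixOf w then 1 else 0)) →
    queryAux w t typed
      = typed + min (w.length : Int) (os.foldl (fun b v => max b (lcpChars w v)) 0 + 1) := by
  intro w
  induction w with
  | nil =>
      intro os t typed ht
      have hF := fmax_nonneg (lcpChars []) os
      simp only [queryAux, List.length_nil, Nat.cast_zero]
      omega
  | cons x rest ih =>
      intro os t typed ht
      cases t with
      | node c e ch =>
        have h1 := ht [x]
        have hpx : ([x].isPrefixOf (x :: rest)) = true := by simp [List.isPrefixOf]
        rw [hpx, if_pos rfl] at h1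
        cases hg : chGet? ch x with
        | none =>
            rw [show countAt (Trie.node c e ch) [x]
                = (match chGet? ch x with | none => 0 | some t => countAt t []) from rfl,
              hg] at h1
            have h1' : (0 : Int)
                = (os.countP (fun v => [x].isPrefixOf v) : Int) + 1 := h1
            omega
        | some child =>
            rw [show countAt (Trie.node c e ch) [x]
                = (match chGet? ch x with | none => 0 | some t => countAt t []) from rfl,
              hg] at h1
            have h1 : trieCount child
                = (os.countP (fun v => [x].isPrefixOf v) : Int) + 1 := by
              rw [← countAt_nil]; exact h1
            simp only [queryAux, hg]
            by_cases h0 : os.countP (fun v => [x].isPrefixOf v) = 0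
            · rw [if_pos (by rw [h1, h0]; simp)]
              have hz : ∀ v ∈ os, lcpChars (x :: rest) v = 0 := by
                intro v hv
                have hnp : ¬ ([x].isPrefixOf v = true) := by
                  intro hp
                  have hgt := List.countP_pos_iff.mpr ⟨v, hv, hp⟩
                  have h0' : List.countP [x].isPrefixOf os = 0 := h0
                  omega
                cases v with
                | nil => rfl
                | cons z zt =>
                    have hyz : ¬ (x = z) := by
                      intro hh; exact hnp (by simp [List.isPrefixOf, hh])
                    simp only [lcpChars]
                    rw [if_neg hyz]
              rw [fmax_zero _ _ hz]
              simp only [List.length_cons]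
              push_cast
              omega
            · have hpos : 0 < os.countP (fun v => [x].isPrefixOf v) := Nat.pos_of_ne_zero h0
              have hne : ¬ (trieCount child = 1) := by
                rw [h1]
                intro hcc
                apply h0
                omega
              rw [if_neg hne]
              have ht' : ∀ q, countAt child q
                  = ((os.filterMap (tailIf x)).countP (fun v => q.isPrefixOf v) : Int)
                    + (if q.isPrefixOf rest then 1 else 0) := by
                intro q
                have h2 := ht (x :: q)
                rw [show countAt (Trie.node c e ch) (x :: q)
                    = (match chGet? ch x with | none => 0 | some t => countAt t q) from rfl,
                  hg] at h2
                have h2 : countAt child q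
                    = (os.countP (fun v => (x :: q).isPrefixOf v) : Int)
                      + (if (x :: q).isPrefixOf (x :: rest) = true then 1 else 0) := h2
                rw [h2, countP_shift]
                have : ((x :: q).isPrefixOf (x :: rest)) = (q.isPrefixOf rest) := by
                  simp [List.isPrefixOf]
                rw [this]
              rw [ih (os.filterMap (tailIf x)) child (typed + 1) ht']
              rw [fmax_step x rest os hpos]
              simp only [List.length_cons]
              push_cast
              omega

theorem split_at (words : List String) (j : Nat) (hj : j < words.length) :
    words.take j ++ words[j] :: words.drop (j + 1) = words := by
  conv_rhs => rw [← List.take_append_drop j words]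
  congr 1
  exact List.getElem_cons_drop hj

theorem perIndex (words : List String) (j : Nat) (hj : j < words.length) :
    queryAux (words[j]).toList
        (words.foldl (fun t w => insertAux w.toList t) (.node 0 false .nil)) 0
      = min ((words[j].length : Int))
          (((words.take j ++ words.drop (j + 1)).foldl
              (fun b v => max b (lcpChars (words[j]).toList v.toList)) 0) + 1) := by
  have hroot := countAt_build words (.node 0 false .nil)
  have ht : ∀ q, countAt (words.foldl (fun t w => insertAux w.toList t) (.node 0 false .nil)) q
      = (((words.take j ++ words.drop (j + 1)).map String.toList).countP
          (fun v => q.isPrefixOf v) : Int)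
        + (if q.isPrefixOf (words[j]).toList then 1 else 0) := by
    intro q
    rw [hroot q, countAt_fresh]
    have hsplit := split_at words j hj
    conv_lhs => rw [← hsplit]
    rw [List.countP_append, List.countP_cons, List.countP_map, List.countP_append]
    have : String.length (words[j]) = (words[j]).toList.length := rfl
    by_cases hq : q.isPrefixOf (words[j]).toList = true <;>
      simp [hq, Function.comp_def] <;> push_cast <;> ring
  rw [qmain (words[j]).toList _ _ 0 ht]
  rw [List.foldl_map]
  have hlen : ((words[j]).toList.length : Int) = ((words[j]).length : Int) := by
    rfl
  rw [hlen, zero_add]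

theorem foldl_add' {α : Type} (f : α → Int) :
    ∀ (l : List α) (a : Int), l.foldl (fun acc x => acc + f x) a = a + (l.map f).sum := by
  intro l
  induction l with
  | nil => intro a; simp
  | cons x l ih => intro a; simp [ih]; ring

theorem solution_eq (words : List String) : solution words = solution_alt words := by
  simp only [solution, solution_alt]
  simp only [foldl_add']
  congr 1
  congr 1
  apply List.ext_getElem
  · simp [PySem.List.length_enumerate]
  · intro j h1 h2
    simp only [List.getElem_map, PySem.List.getElem_enumerate]
    have hjw : j < words.length := by simpa [PySem.List.length_enumerate] using h2
    rw [perIndex words j hjw]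
    have e1 : ((0 : Int) + (j : Int)) = ((j : Nat) : Int) := by omega
    simp only [e1]
    rw [PySem.List.slice_to_natCast]
    rw [show ((j : Nat) : Int) + 1 = (((j + 1 : Nat)) : Int) by push_cast; ring]
    rw [PySem.List.slice_from_natCast]

-- ===== VERDICT (by name: the statement is the Claim_ definition above) =====
theorem solution_spec : Claim_equal_solution := by
  intro words _
  unfold Spec_solution
  exact solution_eq words
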